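-- pv_equiv track=rewrite | github.com/natiBirhauz/Community-Detection-Algorithms | TestAll.py | convert_to_non_overlapping
-- ===== SOURCE A (Python) =====
-- import itertools
--
-- def convert_to_non_overlapping(communities):
--     unique_nodes = set(itertools.chain(*communities))
--     non_overlapping_communities = []
--     node_to_community = {node: None for node in unique_nodes}
--
--     for idx, community in enumerate(communities):
--         for node in community:
--             if node_to_community[node] is None:
--                 node_to_community[node] = idx
--             else:
--                 node_to_community[node] = -1  # Mark as overlapping
--
--     for idx, community in enumerate(communities):
--         non_overlapping_community = [node for node in community if node_to_community[node] == idx]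
--         if non_overlapping_community:
--             non_overlapping_communities.append(non_overlapping_community)
--
--     return non_overlapping_communities
-- ===== SOURCE B (Python) =====
-- def convert_to_non_overlapping(communities):
--     nodes = sorted(node for community in communities for node in community)
--     overlapping = {a for a, b in zip(nodes, nodes[1:]) if a == b}
--     result = []
--     for community in communities:
--         kept = [node for node in community if node not in overlapping]
--         if kept:
--             result.append(kept)
--     return result
-- ===== Notes on version B (the rewrite author's own statement) =====
-- stated objective: alternative
-- what changed: Replaces A's first-owner/overlap-sentinel dictionary and per-index comparison with a sort-based algorithm: flatten and sort all nodes, collect the overlapping nodes as the adjacent equal pairs of the sorted list, and keep each community's nodes that are not in that set.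
import Mathlib
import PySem

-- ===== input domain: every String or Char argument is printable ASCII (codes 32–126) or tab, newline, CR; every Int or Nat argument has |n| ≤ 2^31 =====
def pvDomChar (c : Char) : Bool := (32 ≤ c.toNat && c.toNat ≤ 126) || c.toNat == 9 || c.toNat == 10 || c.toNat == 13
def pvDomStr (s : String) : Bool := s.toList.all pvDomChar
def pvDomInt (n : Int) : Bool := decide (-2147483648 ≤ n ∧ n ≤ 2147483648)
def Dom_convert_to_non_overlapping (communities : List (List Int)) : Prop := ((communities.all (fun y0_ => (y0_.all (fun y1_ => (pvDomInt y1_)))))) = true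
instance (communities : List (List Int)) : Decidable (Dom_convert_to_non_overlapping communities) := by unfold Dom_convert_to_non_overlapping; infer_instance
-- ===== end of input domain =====

-- B replaces A's first-owner/overlap-sentinel dictionary with a sort-based algorithm:
-- sort all nodes, read off the overlapping ones as adjacent equal pairs, filter by set
-- membership (objective: alternative).

-- ===== PORT A =====
-- node_to_community[node] lookups are ported with getD … none: every node looked up is a key of
-- the dict (it was initialised from the set of all nodes), so the default is never consulted.
def convert_to_non_overlapping (communities : List (List Int)) : List (List Int) :=
  let unique_nodes : PySem.Set Int := PySem.Set.ofList communities.flatten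
  let node_to_community : PySem.Dict Int (Option Int) :=
    unique_nodes.foldl (fun d n => d.insert n none) PySem.Dict.empty
  let node_to_community :=
    (PySem.List.enumerate communities 0).foldl
      (fun d p =>
        p.2.foldl
          (fun d node =>
            if d.getD node none = none then d.insert node (some p.1)
            else d.insert node (some (-1))) d)
      node_to_community
  (PySem.List.enumerate communities 0).foldl
    (fun acc p =>
      let non_overlapping_community := p.2.filter (fun node => node_to_community.getD node none == some p.1)
      if non_overlapping_community.isEmpty then acc else acc ++ [non_overlapping_community])
    []

-- ===== PORT B =====
-- 'zip(nodes, nodes[1:])' is ported as List.zip with PySem.List.slice nodes (some 1) none;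
-- the set comprehension becomes PySem.Set.ofList of the filtered first components.
def convert_to_non_overlapping_alt (communities : List (List Int)) : List (List Int) :=
  let nodes := PySem.List.sorted communities.flatten (fun x => x) false
  let overlapping : PySem.Set Int :=
    PySem.Set.ofList
      (((nodes.zip (PySem.List.slice nodes (some 1) none)).filter
          (fun p => p.1 == p.2)).map Prod.fst)
  communities.foldl
    (fun acc community =>
      let kept := community.filter (fun node => !(PySem.Set.contains overlapping node))
      if kept.isEmpty then acc else acc ++ [kept])
    []

-- ===== PRECONDITION & SPEC =====
def Spec_convert_to_non_overlapping (communities : List (List Int)) (out : List (List Int)) : Prop := out = convert_to_non_overlapping_alt communities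
instance (communities : List (List Int)) (out : List (List Int)) : Decidable (Spec_convert_to_non_overlapping communities out) := by unfold Spec_convert_to_non_overlapping; infer_instance

-- ===== CLAIM (what is proved, stated in full; the proofs are below) =====
def Claim_equal_convert_to_non_overlapping : Prop := ∀ (communities : List (List Int)), Dom_convert_to_non_overlapping communities → Spec_convert_to_non_overlapping communities (convert_to_non_overlapping communities)

-- ===== LEMMAS AND PROOFS =====

-- A's per-node update step, and its effect replayed on the list of indices at which the node occurs.
def pvStepA (d : PySem.Dict Int (Option Int)) (i n : Int) : PySem.Dict Int (Option Int) :=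
  if d.getD n none = none then d.insert n (some i) else d.insert n (some (-1))

def pvRunA (cur : Option Int) : List Int → Option Int
  | [] => cur
  | i :: rest => pvRunA (if cur = none then some i else some (-1)) rest

-- the (index, node) pairs A's first loop visits, in order
def pvPairs (communities : List (List Int)) : List (Int × Int) :=
  (PySem.List.enumerate communities 0).flatMap (fun p => p.2.map (fun n => (p.1, n)))

-- B's adjacent-equal extraction, as a named function of the list
def pvDup (l : List Int) : List Int :=
  ((l.zip l.tail).filter (fun p => p.1 == p.2)).map Prod.fst

lemma pvInit_getD (s : List Int) (d : PySem.Dict Int (Option Int))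
    (h : ∀ m, d.getD m none = none) (m : Int) :
    (s.foldl (fun d n => d.insert n none) d).getD m none = none := by
  induction s generalizing d with
  | nil => exact h m
  | cons x t ih =>
      refine ih _ (fun k => ?_)
      rw [PySem.Dict.getD_insert]
      split <;> simp [h]

lemma pvNest_eq_pairs (l : List (Int × List Int)) (d : PySem.Dict Int (Option Int)) :
    l.foldl (fun d p => p.2.foldl (fun d node => pvStepA d p.1 node) d) d
      = (l.flatMap (fun p => p.2.map (fun n => (p.1, n)))).foldl (fun d q => pvStepA d q.1 q.2) d := by
  induction l generalizing d with
  | nil => rfl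
  | cons p t ih =>
      simp only [List.foldl_cons, List.flatMap_cons, List.foldl_append, List.foldl_map]
      exact ih _

lemma pvFoldA_getD (ps : List (Int × Int)) (d : PySem.Dict Int (Option Int)) (n : Int) :
    (ps.foldl (fun d q => pvStepA d q.1 q.2) d).getD n none
      = pvRunA (d.getD n none) ((ps.filter (fun q => q.2 == n)).map Prod.fst) := by
  induction ps generalizing d with
  | nil => rfl
  | cons q t ih =>
      rcases q with ⟨i, m⟩
      simp only [List.foldl_cons, List.filter_cons]
      by_cases hm : m = n
      · subst hm
        have hb : ((((i, m) : Int × Int).2 == m)) = true := by simp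
        rw [hb, if_pos rfl, List.map_cons, ih]
        have hstep : (pvStepA d i m).getD m none
            = if d.getD m none = none then some i else some (-1) := by
          unfold pvStepA
          split <;> rw [PySem.Dict.getD_insert_self]
        rw [hstep]
        conv_rhs => rw [pvRunA]
      · have hb : ((((i, m) : Int × Int).2 == n)) = false := by simpa using hm
        rw [hb]
        simp only [Bool.false_eq_true, if_false]
        rw [ih]
        have hstep : (pvStepA d i m).getD n none = d.getD n none := by
          unfold pvStepA
          split <;> · rw [PySem.Dict.getD_insert]; exact if_neg (fun h => hm h.symm)
        rw [hstep]

lemma pvRunA_some (os : List Int) (j : Int) :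
    pvRunA (some j) os = if os.isEmpty then some j else some (-1) := by
  induction os generalizing j with
  | nil => rfl
  | cons i t ih => simp [pvRunA, ih]

lemma pvRunA_none (os : List Int) :
    pvRunA none os = match os with
      | [] => none
      | [i] => some i
      | _ :: _ :: _ => some (-1) := by
  match os with
  | [] => rfl
  | [i] => rfl
  | i :: j :: t => simp [pvRunA, pvRunA_some]

-- on a (≤)-sorted list, a is an adjacent duplicate iff it occurs at least twice
lemma mem_pvDup_iff (l : List Int) (hs : l.Pairwise (· ≤ ·)) (a : Int) :
    a ∈ pvDup l ↔ 2 ≤ l.count a := by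
  induction l with
  | nil => simp [pvDup]
  | cons x t ih =>
      match t, hs with
      | [], _ =>
          simp only [pvDup, List.tail_cons, List.zip_nil_right, List.filter_nil, List.map_nil,
            List.not_mem_nil, false_iff, not_le, List.count_cons, List.count_nil]
          split <;> omega
      | y :: t, hs =>
          have hxy : x ≤ y := (List.pairwise_cons.1 hs).1 y (by simp)
          have hrest : (y :: t).Pairwise (· ≤ ·) := (List.pairwise_cons.1 hs).2
          have hdup : pvDup (x :: y :: t)
              = (if x = y then [x] else []) ++ pvDup (y :: t) := by
            simp only [pvDup, List.tail_cons, List.zip_cons_cons, List.filter_cons]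
            by_cases h : x = y <;> simp [h]
          have hcnt : (x :: y :: t).count a = (y :: t).count a + (if a = x then 1 else 0) := by
            rw [List.count_cons]
            by_cases h : a = x
            · simp [h]
            · simp [h, Ne.symm h]
          by_cases ha : a = x
          · by_cases hxy' : x = y
            · have hc1 : 0 < (y :: t).count a :=
                List.count_pos_iff.2 (List.mem_cons.2 (Or.inl (ha.trans hxy')))
              rw [hdup, List.mem_append, ih hrest, hcnt, if_pos hxy', if_pos ha]
              simp only [List.mem_singleton]
              constructor
              · intro _; omega
              · intro _; exact Or.inl ha
            · have hya : ∀ z ∈ y :: t, y ≤ z := by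
                intro z hz
                rcases List.mem_cons.1 hz with h | h
                · exact le_of_eq h.symm
                · exact (List.pairwise_cons.1 hrest).1 z h
              have hnot : a ∉ y :: t := by
                intro hm
                exact hxy' (le_antisymm hxy (ha ▸ hya a hm))
              have hc0 : (y :: t).count a = 0 := List.count_eq_zero.2 hnot
              rw [hdup, List.mem_append, ih hrest, hcnt, if_neg hxy', if_pos ha, hc0]
              simp
          · rw [hdup, List.mem_append, ih hrest, hcnt, if_neg ha]
            by_cases hxy' : x = y
            · have hay : ¬ a = y := fun h => ha (h.trans hxy'.symm)
              simp [hxy', hay]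
            · simp [hxy']

-- the second loops of A and B produce equal results once the per-community filters agree
lemma pvSecond_eq (pA : Int → Int → Bool) (pB : Int → Bool)
    (l : List (Int × List Int)) (acc : List (List Int))
    (h : ∀ p ∈ l, p.2.filter (pA p.1) = p.2.filter pB) :
    l.foldl (fun acc p =>
        let k := p.2.filter (pA p.1)
        if k.isEmpty then acc else acc ++ [k]) acc
      = (l.map (·.2)).foldl (fun acc c =>
        let k := c.filter pB
        if k.isEmpty then acc else acc ++ [k]) acc := by
  induction l generalizing acc with
  | nil => rfl
  | cons p t ih =>
      simp only [List.foldl_cons, List.map_cons]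
      rw [h p (by simp)]
      exact ih _ (fun q hq => h q (by simp [hq]))

lemma pvPairs_map_snd (cs : List (List Int)) :
    (pvPairs cs).map Prod.snd = cs.flatten := by
  unfold pvPairs
  rw [List.map_flatMap]
  have h1 : (PySem.List.enumerate cs 0).flatMap (fun p => (p.2.map (fun n => (p.1, n))).map Prod.snd)
      = (PySem.List.enumerate cs 0).flatMap (fun p => p.2) := by
    congr 1
    funext p
    simp
  rw [h1, List.flatMap_def, PySem.List.map_snd_enumerate]

-- core: A's second loop with the finished sentinel dict equals B's loop with the overlap set,
-- given characterisations of both tables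
lemma pvMain (cs : List (List Int)) (dF : PySem.Dict Int (Option Int)) (ov : PySem.Set Int)
    (hd : ∀ n, dF.getD n none = pvRunA none (((pvPairs cs).filter (fun q => q.2 == n)).map Prod.fst))
    (hc : ∀ n, (PySem.Set.contains ov n = true) ↔ 2 ≤ cs.flatten.count n) :
    (PySem.List.enumerate cs 0).foldl (fun acc p =>
        let k := p.2.filter (fun node => dF.getD node none == some p.1)
        if k.isEmpty then acc else acc ++ [k]) []
      = cs.foldl (fun acc c =>
        let k := c.filter (fun node => !(PySem.Set.contains ov node))
        if k.isEmpty then acc else acc ++ [k]) [] := by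
  have hfil : ∀ p ∈ PySem.List.enumerate cs 0,
      p.2.filter ((fun i node => dF.getD node none == some i) p.1)
        = p.2.filter (fun node => !(PySem.Set.contains ov node)) := by
    intro p hp
    apply List.filter_congr
    intro n hn
    obtain ⟨k, hk, hpk⟩ := (PySem.List.mem_enumerate_iff _ _ _).1 hp
    have hidx : 0 ≤ p.1 := by rw [hpk]; simp
    have hpair : (p.1, n) ∈ pvPairs cs := by
      unfold pvPairs
      exact List.mem_flatMap.2 ⟨p, hp, List.mem_map.2 ⟨n, hn, rfl⟩⟩
    have hmemF : (p.1, n) ∈ (pvPairs cs).filter (fun q => q.2 == n) :=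
      List.mem_filter.2 ⟨hpair, by simp⟩
    have hlen : cs.flatten.count n = ((pvPairs cs).filter (fun q => q.2 == n)).length := by
      rw [← pvPairs_map_snd cs, List.count_eq_countP, List.countP_map,
        List.countP_eq_length_filter]
      rfl
    show (dF.getD n none == some p.1) = !(PySem.Set.contains ov n)
    have hcv := hc n
    rw [hd n, hlen] at *
    revert hmemF hcv
    generalize (pvPairs cs).filter (fun q => q.2 == n) = F
    intro hmemF hcv
    match F with
    | [] => exact absurd hmemF (List.not_mem_nil)
    | [q] =>
        have hq : (p.1, n) = q := List.mem_singleton.1 hmemF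
        have hno : PySem.Set.contains ov n = false := by
          cases hcon : PySem.Set.contains ov n
          · rfl
          · exact absurd (hcv.1 hcon) (by simp)
        rw [← hq, hno]
        simp [pvRunA]
    | q :: q2 :: rest =>
        have hyes : PySem.Set.contains ov n = true := hcv.2 (by simp)
        rw [hyes]
        simp only [List.map_cons]
        rw [pvRunA_none]
        have hL : (some (-1 : Int) == some p.1) = false := by
          simp only [beq_eq_false_iff_ne, ne_eq, Option.some.injEq]
          omega
        simp [hL]
  exact Eq.trans
    (pvSecond_eq (fun i node => dF.getD node none == some i)
      (fun node => !(PySem.Set.contains ov node)) (PySem.List.enumerate cs 0) [] hfil)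
    (by rw [PySem.List.map_snd_enumerate])

theorem convert_to_non_overlapping_spec_aux (communities : List (List Int)) :
    convert_to_non_overlapping communities = convert_to_non_overlapping_alt communities := by
  unfold convert_to_non_overlapping convert_to_non_overlapping_alt
  simp only [PySem.List.slice_from_one]
  refine pvMain communities _ _ ?_ ?_
  · intro n
    have h1 := pvNest_eq_pairs (PySem.List.enumerate communities 0)
      ((PySem.Set.ofList communities.flatten).foldl (fun d n => d.insert n none) PySem.Dict.empty)
    have h2 := pvFoldA_getD
      ((PySem.List.enumerate communities 0).flatMap (fun p => p.2.map (fun n => (p.1, n))))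
      ((PySem.Set.ofList communities.flatten).foldl (fun d n => d.insert n none) PySem.Dict.empty) n
    simp only [pvStepA] at h1 h2
    rw [h1, h2, pvInit_getD _ _ (by intro m; simp) n]
    rfl
  · intro n
    have hmem : (PySem.Set.contains (PySem.Set.ofList
        (pvDup (PySem.List.sorted communities.flatten (fun x => x) false))) n = true)
        ↔ n ∈ pvDup (PySem.List.sorted communities.flatten (fun x => x) false) := by
      simp [PySem.Set.contains, PySem.Set.mem_ofList]
    have hpw : (PySem.List.sorted communities.flatten (fun x => x) false).Pairwise (· ≤ ·) := by
      have := PySem.List.sorted_pairwise communities.flatten (fun x => x)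
      simpa using this
    have hcount : (PySem.List.sorted communities.flatten (fun x => x) false).count n
        = communities.flatten.count n :=
      (PySem.List.sorted_perm communities.flatten (fun x => x) false).count_eq n
    exact hmem.trans (by rw [mem_pvDup_iff _ hpw, hcount])

-- ===== VERDICT (by name: the statement is the Claim_ definition above) =====
theorem convert_to_non_overlapping_spec : Claim_equal_convert_to_non_overlapping := by
  intro communities _
  exact convert_to_non_overlapping_spec_aux communities
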